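-- pv_equiv track=rewrite | github.com/prosellen/bmad-coder-docker | config/scripts/render-config.py | _merge_agents_md
-- ===== SOURCE A (Python) =====
-- def _merge_agents_md(existing: str, new: str) -> str:
--     """
--     Merge AGENTS.md by preserving user content while updating system sections.
--
--     Strategy: Extract sections (### headers) from both files. For sections that
--     exist in the new template, use the new content. For sections only in the
--     existing file (user-added), preserve them.
--     """
--     def extract_sections(content: str) -> dict:
--         """Extract sections keyed by header name"""
--         sections = {}
--         current_header = None
--         current_content = []
--
--         lines = content.split('\n')
--         i = 0
--
--         # Capture content before first section
--         preamble = []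
--         while i < len(lines):
--             line = lines[i]
--             if line.startswith('### '):
--                 break
--             preamble.append(line)
--             i += 1
--
--         if preamble:
--             sections['__PREAMBLE__'] = '\n'.join(preamble)
--
--         # Extract sections
--         while i < len(lines):
--             line = lines[i]
--
--             if line.startswith('### '):
--                 # Save previous section
--                 if current_header is not None:
--                     sections[current_header] = '\n'.join(current_content)
--
--                 # Start new section
--                 current_header = line
--                 current_content = [line]
--             else:
--                 current_content.append(line)
--
--             i += 1
--
--         # Save last section
--         if current_header is not None:
--             sections[current_header] = '\n'.join(current_content)
--
--         return sections
--
--     existing_sections = extract_sections(existing)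
--     new_sections = extract_sections(new)
--
--     # Merge: prioritize new template sections, add user-only sections at end
--     merged_sections = []
--
--     # Start with preamble from new template
--     if '__PREAMBLE__' in new_sections:
--         merged_sections.append(new_sections['__PREAMBLE__'])
--
--     # Add all sections from new template (in order)
--     for header, content in new_sections.items():
--         if header != '__PREAMBLE__':
--             merged_sections.append(content)
--
--     # Add user-created sections that don't exist in new template
--     for header, content in existing_sections.items():
--         if header != '__PREAMBLE__' and header not in new_sections:
--             merged_sections.append(content)
--
--     return '\n\n'.join(merged_sections)
-- ===== SOURCE B (Python) =====
-- def _merge_agents_md(existing: str, new: str) -> str: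
--     """Merge AGENTS.md: build each file's section table back-to-front in a single
--     reverse pass (suffix accumulator), then merge by copying the new table and
--     conditionally inserting user-only sections."""
--
--     def sections(content):
--         pairs = []   # (header, chunk) pairs, collected back-to-front
--         tail = []    # lines of the chunk under construction, in reverse order
--         for line in reversed(content.split('\n')):
--             if line.startswith('### '):
--                 pairs.append((line, '\n'.join([line] + list(reversed(tail)))))
--                 tail = []
--             else:
--                 tail.append(line)
--         d = {}
--         if tail:
--             d['__PREAMBLE__'] = '\n'.join(reversed(tail))
--         for h, c in reversed(pairs):
--             d[h] = c
--         return d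
--
--     ex, nw = sections(existing), sections(new)
--     merged = dict(nw)
--     for h, v in ex.items():
--         if h != '__PREAMBLE__' and h not in nw:
--             merged[h] = v
--     return '\n\n'.join(merged.values())
-- ===== Notes on version B (the rewrite author's own statement) =====
-- stated objective: alternative
-- what changed: Parses sections back-to-front: a single reverse pass over the lines with a suffix accumulator emits (header, chunk) pairs (leftover accumulator = preamble), instead of A's forward state machine with current_header/current_content and a separate preamble loop; the merge becomes a dict copy plus conditional inserts instead of A's three explicit append loops.
import Mathlib
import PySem

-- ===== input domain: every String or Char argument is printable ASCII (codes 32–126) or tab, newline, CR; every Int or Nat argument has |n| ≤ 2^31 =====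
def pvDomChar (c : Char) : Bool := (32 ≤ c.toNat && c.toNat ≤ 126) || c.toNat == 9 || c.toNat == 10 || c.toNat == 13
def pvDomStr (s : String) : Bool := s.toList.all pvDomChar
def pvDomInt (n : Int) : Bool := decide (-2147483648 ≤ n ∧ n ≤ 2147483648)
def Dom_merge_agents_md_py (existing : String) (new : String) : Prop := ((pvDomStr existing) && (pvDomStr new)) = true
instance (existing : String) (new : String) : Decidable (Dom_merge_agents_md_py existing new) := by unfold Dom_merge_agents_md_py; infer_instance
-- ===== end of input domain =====

-- B parses sections back-to-front (one reverse pass with a suffix accumulator emitting (header, chunk)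
-- pairs, the leftover accumulator being the preamble) instead of A's forward state machine, and merges
-- by copying the new dict and conditionally inserting user-only sections instead of A's three append
-- loops; objective: alternative decomposition (same O(n) cost).

-- ===== PORT A =====

-- `line.startswith('### ')` (the header test both programs use)
def pvHdr (line : String) : Bool := PySem.Str.startswith line "### "

-- A's first while-loop: collect preamble lines until the first header, return (preamble, remaining lines)
def pvAPre : List String → List String × List String
  | [] => ([], [])
  | l :: t =>
    if pvHdr l then ([], l :: t)
    else
      let pr := pvAPre t
      (l :: pr.1, pr.2)

-- one iteration of A's second while-loop; state = (sections, current_header, current_content)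
def pvAStep (st : PySem.Dict String String × Option String × List String)
    (line : String) : PySem.Dict String String × Option String × List String :=
  if pvHdr line then
    match st.2.1 with
    | some h => (st.1.insert h (PySem.Str.join "\n" st.2.2), some line, [line])
    | none => (st.1, some line, [line])
  else (st.1, st.2.1, st.2.2 ++ [line])

-- A's trailing "save last section" step: state = (sections, current_header, current_content)
def pvFinalize (st : PySem.Dict String String × Option String × List String) :
    PySem.Dict String String :=
  match st.2.1 with
  | some h => st.1.insert h (PySem.Str.join "\n" st.2.2)
  | none => st.1

-- A's extract_sections
def pvAExtract (content : String) : PySem.Dict String String :=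
  let lines := (PySem.Str.split? content "\n").getD []
  let pr := pvAPre lines
  let secs0 : PySem.Dict String String :=
    if pr.1 ≠ [] then (PySem.Dict.empty).insert "__PREAMBLE__" (PySem.Str.join "\n" pr.1)
    else PySem.Dict.empty
  pvFinalize (pr.2.foldl pvAStep (secs0, none, []))

def merge_agents_md_py (existing : String) (new : String) : String :=
  let existing_sections := pvAExtract existing
  let new_sections := pvAExtract new
  let merged : List String :=
    if new_sections.contains "__PREAMBLE__" then
      [(new_sections.get? "__PREAMBLE__").getD ""]
    else []
  let merged := new_sections.items.foldl
    (fun acc p => if p.1 != "__PREAMBLE__" then acc ++ [p.2] else acc) merged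
  let merged := existing_sections.items.foldl
    (fun acc p => if (p.1 != "__PREAMBLE__" && !new_sections.contains p.1) then acc ++ [p.2] else acc)
    merged
  PySem.Str.join "\n\n" merged

-- ===== PORT B =====

-- one iteration of B's reverse pass; state = (pairs, tail) with tail the reversed chunk-in-progress
def pvBStep (st : List (String × String) × List String) (line : String) :
    List (String × String) × List String :=
  if pvHdr line then
    (st.1 ++ [(line, PySem.Str.join "\n" (line :: st.2.reverse))], [])
  else (st.1, st.2 ++ [line])

-- B's sections helper
def pvBSections (content : String) : PySem.Dict String String :=
  let lines := (PySem.Str.split? content "\n").getD []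
  let st := lines.reverse.foldl pvBStep ([], [])
  let d : PySem.Dict String String :=
    if st.2 ≠ [] then
      (PySem.Dict.empty).insert "__PREAMBLE__" (PySem.Str.join "\n" st.2.reverse)
    else PySem.Dict.empty
  st.1.reverse.foldl (fun d p => d.insert p.1 p.2) d

def merge_agents_md_py_alt (existing : String) (new : String) : String :=
  let ex := pvBSections existing
  let nw := pvBSections new
  let merged := ex.items.foldl
    (fun m p => if p.1 != "__PREAMBLE__" && !nw.contains p.1 then m.insert p.1 p.2 else m) nw
  PySem.Str.join "\n\n" merged.values

-- ===== PRECONDITION & SPEC =====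
def Spec_merge_agents_md_py (existing : String) (new : String) (out : String) : Prop := out = merge_agents_md_py_alt existing new
instance (existing : String) (new : String) (out : String) : Decidable (Spec_merge_agents_md_py existing new out) := by unfold Spec_merge_agents_md_py; infer_instance

-- ===== CLAIM (what is proved, stated in full; the proofs are below) =====
def Claim_equal_merge_agents_md_py : Prop := ∀ (existing : String) (new : String), Dom_merge_agents_md_py existing new → Spec_merge_agents_md_py existing new (merge_agents_md_py existing new)

-- ===== LEMMAS AND PROOFS =====

-- common reference form of both parsers: the (header, chunk) pairs of the post-preamble lines
def pvChunkPairs (rest : List String) : List (String × String) :=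
  match rest with
  | [] => []
  | h :: t =>
    (h, PySem.Str.join "\n" (h :: t.takeWhile (fun l => !pvHdr l))) ::
      pvChunkPairs (t.dropWhile (fun l => !pvHdr l))
termination_by rest.length
decreasing_by
  have := List.length_dropWhile_le (fun l => !pvHdr l) t
  simp; omega

def pvChunkRec (rest : List String) (d : PySem.Dict String String) : PySem.Dict String String :=
  match rest with
  | [] => d
  | h :: t =>
    pvChunkRec (t.dropWhile (fun l => !pvHdr l))
      (d.insert h (PySem.Str.join "\n" (h :: t.takeWhile (fun l => !pvHdr l))))
termination_by rest.length
decreasing_by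
  have := List.length_dropWhile_le (fun l => !pvHdr l) t
  simp; omega

theorem pvChunkRec_eq (rest : List String) (d : PySem.Dict String String) :
    pvChunkRec rest d = (pvChunkPairs rest).foldl (fun d p => d.insert p.1 p.2) d := by
  induction rest, d using pvChunkRec.induct with
  | case1 d => rw [pvChunkRec, pvChunkPairs, List.foldl_nil]
  | case2 d h t ih => rw [pvChunkRec, pvChunkPairs, List.foldl_cons, ih]

theorem pvAPre_eq (ls : List String) :
    pvAPre ls = (ls.takeWhile (fun l => !pvHdr l), ls.dropWhile (fun l => !pvHdr l)) := by
  induction ls with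
  | nil => rfl
  | cons l t ih =>
    by_cases h : pvHdr l = true <;>
      simp [pvAPre, h, ih]

theorem pvAFold_eq (rest : List String) (d : PySem.Dict String String) (h : String)
    (acc : List String) :
    pvFinalize (rest.foldl pvAStep (d, some h, acc)) =
      pvChunkRec (rest.dropWhile (fun l => !pvHdr l))
        (d.insert h (PySem.Str.join "\n" (acc ++ rest.takeWhile (fun l => !pvHdr l)))) := by
  induction rest generalizing d h acc with
  | nil => simp [pvFinalize, pvChunkRec]
  | cons l t ih =>
    by_cases hl : pvHdr l = true
    · simp only [List.foldl_cons, pvAStep, hl, if_pos]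
      rw [ih]
      simp [hl, pvChunkRec]
    · simp only [List.foldl_cons, pvAStep, hl]
      rw [if_neg (by simp), ih]
      simp [hl]

theorem pvHead_dropWhile (l : List String) (x : String)
    (hx : (l.dropWhile (fun s => !pvHdr s)).head? = some x) : pvHdr x = true := by
  induction l with
  | nil => simp at hx
  | cons a t ih =>
    rw [List.dropWhile_cons] at hx
    by_cases h : pvHdr a = true
    · rw [if_neg (by simp [h])] at hx
      simp at hx
      rw [← hx]
      exact h
    · rw [if_pos (by simp [h])] at hx
      exact ih hx

theorem pvAFoldTop (rest : List String) (d : PySem.Dict String String)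
    (hh : ∀ x ∈ rest.head?, pvHdr x = true) :
    pvFinalize (rest.foldl pvAStep (d, none, [])) = pvChunkRec rest d := by
  cases rest with
  | nil => simp [pvFinalize, pvChunkRec]
  | cons l t =>
    have hl : pvHdr l = true := hh l rfl
    simp only [List.foldl_cons, pvAStep, hl, if_pos]
    rw [pvAFold_eq, pvChunkRec]
    simp

-- B's reverse pass computes the reversed chunk pairs and the reversed preamble
theorem pvBFold (lines : List String) :
    lines.reverse.foldl pvBStep ([], []) =
      ((pvChunkPairs (lines.dropWhile (fun l => !pvHdr l))).reverse,
       (lines.takeWhile (fun l => !pvHdr l)).reverse) := by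
  rw [List.foldl_reverse]
  induction lines with
  | nil => simp [pvChunkPairs]
  | cons l t ih =>
    rw [List.foldr_cons, ih]
    by_cases hl : pvHdr l = true
    · simp [pvBStep, hl, pvChunkPairs]
    · simp [pvBStep, hl]

theorem pvExtract_eq (content : String) : pvAExtract content = pvBSections content := by
  unfold pvAExtract pvBSections
  simp only [pvAPre_eq]
  generalize (PySem.Str.split? content "\n").getD ([] : List String) = lines
  rw [pvAFoldTop _ _ (fun x hx => pvHead_dropWhile lines x hx), pvChunkRec_eq, pvBFold]
  simp only [List.reverse_reverse, ne_eq, List.reverse_eq_nil_iff]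

-- invariant: every item after the first has a '### ' header key
def pvInv (d : PySem.Dict String String) : Prop :=
  ∀ p ∈ d.items.tail, pvHdr p.1 = true

theorem pvInv_insert (d : PySem.Dict String String) (h v : String)
    (hd : pvInv d) (hh : pvHdr h = true) : pvInv (d.insert h v) := by
  intro p hp
  by_cases hc : d.contains h = true
  · rw [PySem.Dict.items_insert_of_contains d v hc] at hp
    rw [← List.map_tail] at hp
    obtain ⟨q, hq, rfl⟩ := List.mem_map.1 hp
    by_cases hqk : (q.1 == h) = true
    · simpa [hqk] using hh
    · simpa [hqk] using hd q hq
  · rw [PySem.Dict.items_insert_of_not_contains d v (by simpa using hc)] at hp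
    cases hi : d.items with
    | nil => rw [hi] at hp; simp at hp
    | cons a t =>
      rw [hi, List.cons_append, List.tail_cons] at hp
      rcases List.mem_append.1 hp with h1 | h2
      · exact hd p (by rw [hi, List.tail_cons]; exact h1)
      · rw [List.mem_singleton.1 h2]
        exact hh

theorem pvInv_empty : pvInv (PySem.Dict.empty : PySem.Dict String String) := by
  intro p hp
  rw [show (PySem.Dict.empty : PySem.Dict String String).items = [] from rfl] at hp
  simp at hp

theorem pvInv_single (k v : String) :
    pvInv ((PySem.Dict.empty : PySem.Dict String String).insert k v) := by
  intro p hp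
  rw [PySem.Dict.items_insert_of_not_contains _ _ (PySem.Dict.contains_empty _),
    show (PySem.Dict.empty : PySem.Dict String String).items = [] from rfl] at hp
  simp at hp

theorem pvInv_chunkRec (rest : List String) (d : PySem.Dict String String) :
    pvInv d → (∀ x ∈ rest.head?, pvHdr x = true) → pvInv (pvChunkRec rest d) := by
  induction rest, d using pvChunkRec.induct with
  | case1 d => intro hd _; rw [pvChunkRec]; exact hd
  | case2 d h t ih =>
    intro hd hh
    rw [pvChunkRec]
    exact ih (pvInv_insert _ _ _ hd (hh h rfl)) (fun x hx => pvHead_dropWhile t x hx)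

theorem pvInv_sections (content : String) : pvInv (pvBSections content) := by
  rw [← pvExtract_eq]
  unfold pvAExtract
  simp only [pvAPre_eq]
  generalize (PySem.Str.split? content "\n").getD ([] : List String) = lines
  rw [pvAFoldTop _ _ (fun x hx => pvHead_dropWhile lines x hx)]
  apply pvInv_chunkRec
  · split
    · exact pvInv_single _ _
    · exact pvInv_empty
  · exact fun x hx => pvHead_dropWhile lines x hx

theorem pvMergeNew (d : PySem.Dict String String) (hd : pvInv d) :
    (if d.contains "__PREAMBLE__" then [(d.get? "__PREAMBLE__").getD ""] else []) ++
      (d.items.filter (fun p => p.1 != "__PREAMBLE__")).map (·.2) = d.values := by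
  have hP : pvHdr "__PREAMBLE__" = false := by decide
  obtain ⟨items⟩ := d
  cases items with
  | nil => simp [PySem.Dict.contains_mk, PySem.Dict.values_mk]
  | cons p t =>
    have ht : ∀ q ∈ t, pvHdr q.1 = true := fun q hq => hd q (by simpa using hq)
    have htP : ∀ q ∈ t, ¬ q.1 = "__PREAMBLE__" := by
      intro q hq he
      have h2 := ht q hq
      rw [he, hP] at h2
      cases h2
    obtain ⟨k, v⟩ := p
    by_cases hk : k = "__PREAMBLE__"
    · subst hk
      rw [show ({ items := ("__PREAMBLE__", v) :: t } : PySem.Dict String String).contains "__PREAMBLE__" = true by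
        rw [PySem.Dict.contains_mk]; simp]
      rw [if_pos rfl, PySem.Dict.get?_mk_cons, if_pos (by simp), PySem.Dict.values_mk]
      simp only [List.filter_cons]
      rw [List.filter_eq_self.2 (fun q hq => by simpa [bne_iff_ne] using htP q hq)]
      simp
    · rw [show ({ items := (k, v) :: t } : PySem.Dict String String).contains "__PREAMBLE__" = false by
        rw [PySem.Dict.contains_mk, List.any_eq_false]
        intro q hq
        rcases List.mem_cons.1 hq with rfl | hq2
        · simpa [beq_iff_eq] using hk
        · simpa [beq_iff_eq] using htP q hq2]
      rw [if_neg (by simp), PySem.Dict.values_mk]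
      rw [List.filter_eq_self.2 ?_]
      · simp
      · intro q hq
        rcases List.mem_cons.1 hq with rfl | hq2
        · simpa [bne_iff_ne] using hk
        · simpa [bne_iff_ne] using htP q hq2

-- keys stay nodup under insert
theorem pvNodupKeys_insert (d : PySem.Dict String String) (k v : String)
    (h : (d.items.map (·.1)).Nodup) : ((d.insert k v).items.map (·.1)).Nodup := by
  by_cases hc : d.contains k = true
  · rw [PySem.Dict.items_insert_of_contains d v hc, List.map_map]
    have he : ∀ p ∈ d.items,
        ((·.1) ∘ (fun p : String × String => if p.1 == k then (k, v) else p)) p = p.1 := by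
      intro p _
      by_cases hpk : (p.1 == k) = true
      · simp [Function.comp, (beq_iff_eq.mp hpk).symm]
      · simp [Function.comp, hpk]
    rw [List.map_congr_left he]
    exact h
  · rw [PySem.Dict.items_insert_of_not_contains d v (by simpa using hc), List.map_append,
      List.map_cons, List.map_nil]
    refine List.Nodup.append h (List.nodup_singleton _) ?_
    intro x hx hxk
    obtain ⟨p, hp, rfl⟩ := List.mem_map.1 hx
    have hk : ¬ (p.1 == k) = true := by
      intro he
      exact hc (List.any_eq_true.mpr ⟨p, hp, he⟩)
    exact hk (by simpa using (List.mem_singleton.1 hxk))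

theorem pvNodup_foldl_insert (pairs : List (String × String)) (d : PySem.Dict String String)
    (hd : (d.items.map (·.1)).Nodup) :
    (((pairs.foldl (fun d p => d.insert p.1 p.2) d).items.map (·.1)).Nodup) := by
  induction pairs generalizing d with
  | nil => exact hd
  | cons p t ih => exact ih _ (pvNodupKeys_insert d p.1 p.2 hd)

theorem pvNodupKeys_sections (content : String) :
    ((pvBSections content).items.map (·.1)).Nodup := by
  unfold pvBSections
  apply pvNodup_foldl_insert
  split
  · rw [PySem.Dict.items_insert_of_not_contains _ _ (PySem.Dict.contains_empty _),
      show (PySem.Dict.empty : PySem.Dict String String).items = [] from rfl]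
    simp
  · rw [show (PySem.Dict.empty : PySem.Dict String String).items = [] from rfl]
    simp

-- B's merge fold appends exactly the filtered user-only section contents to nw's values
theorem pvMergeFold (nw : PySem.Dict String String) (items : List (String × String))
    (m : PySem.Dict String String)
    (hnd : (items.map (·.1)).Nodup)
    (H : ∀ p ∈ items, (p.1 != "__PREAMBLE__" && !nw.contains p.1) = true →
      m.contains p.1 = false) :
    (items.foldl
        (fun m p => if p.1 != "__PREAMBLE__" && !nw.contains p.1 then m.insert p.1 p.2 else m)
        m).values
      = m.values ++
        (items.filter (fun p => p.1 != "__PREAMBLE__" && !nw.contains p.1)).map (·.2) := by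
  induction items generalizing m with
  | nil => simp
  | cons p t ih =>
    simp only [List.foldl_cons, List.filter_cons]
    have hnd' := hnd
    rw [List.map_cons, List.nodup_cons] at hnd'
    obtain ⟨hp1, hndt⟩ := hnd'
    by_cases hc : (p.1 != "__PREAMBLE__" && !nw.contains p.1) = true
    · have hmc : m.contains p.1 = false := H p (by simp) hc
      rw [if_pos hc, if_pos hc, ih (m.insert p.1 p.2) hndt ?_]
      · have hv : (m.insert p.1 p.2).values = m.values ++ [p.2] := by
          show ((m.insert p.1 p.2).items.map (·.2)) = m.items.map (·.2) ++ [p.2]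
          rw [PySem.Dict.items_insert_of_not_contains m p.2 (by simp [hmc]), List.map_append]
          rfl
        rw [hv, List.map_cons, List.append_assoc, List.singleton_append]
      · intro q hq hcq
        have hq1 : ¬ (p.1 == q.1) = true := by
          intro he
          exact hp1 (beq_iff_eq.mp he ▸ List.mem_map.2 ⟨q, hq, rfl⟩)
        have hmq : m.contains q.1 = false := H q (by simp [hq]) hcq
        show ((m.insert p.1 p.2).items.any (fun r => r.1 == q.1)) = false
        rw [PySem.Dict.items_insert_of_not_contains m p.2 (by simp [hmc]), List.any_append]
        have hma : (m.items.any (fun r => r.1 == q.1)) = false := hmq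
        simp [hma, hq1]
    · rw [if_neg hc, if_neg hc]
      exact ih m hndt (fun q hq => H q (by simp [hq]))

-- ===== VERDICT (by name: the statement is the Claim_ definition above) =====
theorem merge_agents_md_py_spec : Claim_equal_merge_agents_md_py := by
  intro existing new _
  unfold Spec_merge_agents_md_py
  simp only [merge_agents_md_py, merge_agents_md_py_alt]
  rw [pvExtract_eq existing, pvExtract_eq new]
  rw [PySem.List.foldl_append_if, PySem.List.foldl_append_if]
  rw [pvMergeFold (pvBSections new) (pvBSections existing).items (pvBSections new)
    (pvNodupKeys_sections existing) ?_]
  · rw [← pvMergeNew _ (pvInv_sections new), List.append_assoc]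
  · intro p _ hcq
    simp only [Bool.and_eq_true, Bool.not_eq_true'] at hcq
    exact hcq.2
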